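-- pv_equiv track=rewrite | github.com/addy1997/python-RRT | digraph/source/Writer.py | __is_edge
-- ===== SOURCE A (Python) =====
-- def __is_edge(word1, word2):  # examine those two words whether they have edge or not
--     count = 0
--     for letter in word1:
--         if letter in word2:
--             count += 1
--             word2 = word2.replace(letter, '', 1)  # remove the counting element to not counts again
--
--     if count == len(word1) - 3:  # 3 letters are different
--         return True
--     else:
--         return False
-- ===== SOURCE B (Python) =====
-- def __is_edge(word1, word2):
--     # Simpler: multiset-intersection count via per-letter min of occurrence counts.
--     common = 0
--     for ch in dict.fromkeys(word1):  # distinct letters of word1, first-occurrence order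
--         common += min(word1.count(ch), word2.count(ch))
--     return common == len(word1) - 3
-- ===== Notes on version B (the rewrite author's own statement) =====
-- stated objective: faster
-- what changed: Replaces the per-letter consumption loop (membership test plus str.replace removal on a shrinking copy of word2) with a direct multiset-intersection count: sum of min(word1.count(ch), word2.count(ch)) over the distinct letters of word1.
import Mathlib
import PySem

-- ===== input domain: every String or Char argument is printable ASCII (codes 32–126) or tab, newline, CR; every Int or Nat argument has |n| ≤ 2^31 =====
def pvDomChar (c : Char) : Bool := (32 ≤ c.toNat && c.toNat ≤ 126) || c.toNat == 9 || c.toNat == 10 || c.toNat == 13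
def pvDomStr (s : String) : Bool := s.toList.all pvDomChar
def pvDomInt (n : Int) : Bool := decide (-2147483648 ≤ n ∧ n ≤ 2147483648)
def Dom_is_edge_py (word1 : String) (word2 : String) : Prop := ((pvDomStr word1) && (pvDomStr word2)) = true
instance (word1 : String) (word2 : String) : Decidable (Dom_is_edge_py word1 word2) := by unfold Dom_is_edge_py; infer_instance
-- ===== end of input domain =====

-- B counts common letters as sum over distinct letters of min occurrence counts instead of
-- A's consuming loop that erases matched letters from a shrinking copy of word2 (simpler).

-- ===== PORT A =====
-- `word2.replace(letter, '', 1)` for a single character and empty replacement removes the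
-- first occurrence of that character: ported by hand as List.erase (exact for this call shape).
def is_edge_py (word1 : String) (word2 : String) : Bool :=
  let st := word1.toList.foldl
    (fun (st : Int × List Char) letter =>
      if st.2.contains letter then (st.1 + 1, st.2.erase letter) else st)
    (0, word2.toList)
  -- `if count == len(word1) - 3: return True else: return False`
  st.1 == (PySem.Str.len word1 : Int) - 3

-- ===== PORT B =====
-- `word.count(ch)` for a single character ch is the number of occurrences of that
-- character: ported by hand as List.count (exact for single-character needles).
def is_edge_py_alt (word1 : String) (word2 : String) : Bool :=
  let common := (PySem.List.dedup word1.toList).foldl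
    (fun (acc : Int) ch =>
      acc + min ((word1.toList.count ch : Int)) (word2.toList.count ch))
    0
  common == (PySem.Str.len word1 : Int) - 3

-- ===== PRECONDITION & SPEC =====
def Spec_is_edge_py (word1 : String) (word2 : String) (out : Bool) : Prop := out = is_edge_py_alt word1 word2
instance (word1 : String) (word2 : String) (out : Bool) : Decidable (Spec_is_edge_py word1 word2 out) := by unfold Spec_is_edge_py; infer_instance

-- ===== CLAIM (what is proved, stated in full; the proofs are below) =====
def Claim_equal_is_edge_py : Prop := ∀ (word1 : String) (word2 : String), Dom_is_edge_py word1 word2 → Spec_is_edge_py word1 word2 (is_edge_py word1 word2)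

-- ===== LEMMAS AND PROOFS =====

-- A's loop, started at count n, adds the length of the bag-intersection of the words.
theorem pvLoopA (l1 : List Char) : ∀ (l2 : List Char) (n : Int),
    (l1.foldl (fun (st : Int × List Char) c =>
        if st.2.contains c then (st.1 + 1, st.2.erase c) else st) (n, l2)).1
      = n + (l1.bagInter l2).length := by
  induction l1 with
  | nil => intro l2 n; simp
  | cons c l1 ih =>
    intro l2 n
    by_cases h : c ∈ l2
    · rw [List.foldl_cons, if_pos (by simpa using h), ih, List.cons_bagInter_of_pos _ h]
      push_cast [List.length_cons]; ring
    · rw [List.foldl_cons, if_neg (by simpa using h), ih, List.cons_bagInter_of_neg _ h]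

theorem pvLenSum (l : List Char) : (∑ a ∈ l.toFinset, l.count a) = l.length := by
  simpa using Multiset.toFinset_sum_count_eq (l : Multiset Char)

-- B's per-distinct-letter sum of min counts is the length of the bag-intersection.
theorem pvSumMin (l1 l2 : List Char) :
    ((PySem.List.dedup l1).map (fun c => min (l1.count c) (l2.count c))).sum
      = (l1.bagInter l2).length := by
  have hn := PySem.List.nodup_dedup l1
  have h1 : (PySem.List.dedup l1).toFinset = l1.toFinset := by
    ext a; simp
  rw [← List.sum_toFinset _ hn, h1]
  rw [Finset.sum_congr rfl (fun a _ => (List.count_bagInter (a := a) (l₁ := l1) (l₂ := l2)).symm)]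
  rw [← pvLenSum (l1.bagInter l2)]
  refine (Finset.sum_subset ?_ ?_).symm
  · intro a ha
    simp only [List.mem_toFinset, List.mem_bagInter] at ha ⊢
    exact ha.1
  · intro a _ ha
    simp only [List.mem_toFinset] at ha
    exact List.count_eq_zero_of_not_mem ha

theorem pvSumMinInt (l1 l2 : List Char) :
    (List.map (fun ch => min ((l1.count ch : Int)) (l2.count ch)) (PySem.List.dedup l1)).sum
      = ((l1.bagInter l2).length : Int) := by
  have h := congrArg (Nat.cast : ℕ → ℤ) (pvSumMin l1 l2)
  rw [Nat.cast_list_sum, List.map_map] at h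
  simpa [Function.comp_def, Nat.cast_min] using h

-- ===== VERDICT (by name: the statement is the Claim_ definition above) =====
theorem is_edge_py_spec : Claim_equal_is_edge_py := by
  intro word1 word2 _
  unfold Spec_is_edge_py
  simp only [is_edge_py, is_edge_py_alt]
  rw [pvLoopA, PySem.List.foldl_add, pvSumMinInt]
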